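-- pv_equiv track=rewrite | github.com/nareohanyan/SmartRest_AI-Agent | app/agent/planning.py | _count_term_hits
-- ===== SOURCE A (Python) =====
-- def _count_term_hits(normalized_question: str, tokens: set[str], terms: set[str]) -> int:
--     hits = 0
--     for term in terms:
--         if " " in term:
--             if term in normalized_question:
--                 hits += 1
--             continue
--         if term in tokens or any(token.startswith(term) for token in tokens):
--             hits += 1
--     return hits
-- ===== SOURCE B (Python) =====
-- def _count_term_hits(normalized_question: str, tokens: set[str], terms: set[str]) -> int:
--     # Build every prefix of every token once; a single-word term hits
--     # iff it is one of these prefixes (t[:len(t)] covers exact matches).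
--     prefixes = {t[:k] for t in tokens for k in range(len(t) + 1)}
--     hits = 0
--     for term in terms:
--         if " " in term:
--             hits += term in normalized_question
--         else:
--             hits += term in prefixes
--     return hits
-- ===== Notes on version B (the rewrite author's own statement) =====
-- stated objective: alternative
-- what changed: Instead of scanning all tokens for each term, B builds a set of all token prefixes once and answers each single-word term with one set lookup (the equality test is subsumed since every token is its own prefix).
import Mathlib
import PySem

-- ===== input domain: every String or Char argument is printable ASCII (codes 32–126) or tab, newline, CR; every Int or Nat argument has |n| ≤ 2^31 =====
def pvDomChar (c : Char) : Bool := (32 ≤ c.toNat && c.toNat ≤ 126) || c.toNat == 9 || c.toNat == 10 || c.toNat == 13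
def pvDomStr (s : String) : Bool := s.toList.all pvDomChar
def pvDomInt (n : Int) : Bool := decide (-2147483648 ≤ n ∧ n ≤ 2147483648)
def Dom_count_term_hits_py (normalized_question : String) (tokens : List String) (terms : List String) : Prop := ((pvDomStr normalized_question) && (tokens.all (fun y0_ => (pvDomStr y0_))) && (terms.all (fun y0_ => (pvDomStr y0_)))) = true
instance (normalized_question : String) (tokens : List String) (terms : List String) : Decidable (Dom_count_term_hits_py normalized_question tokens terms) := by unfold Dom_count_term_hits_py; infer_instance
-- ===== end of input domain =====

-- B replaces A's per-term scan over all tokens by a set of all token prefixes built once.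

-- ===== PORT A =====
def count_term_hits_py (normalized_question : String) (tokens : List String) (terms : List String) : Int :=
  terms.foldl (fun hits term =>
    if PySem.Str.isIn " " term then
      if PySem.Str.isIn term normalized_question then hits + 1 else hits
    else
      if PySem.Set.contains tokens term || tokens.any (fun token => PySem.Str.startswith token term) then
        hits + 1
      else hits) 0

-- ===== PORT B =====
-- {t[:k] for t in tokens for k in range(len(t) + 1)}
def pvPrefixes (tokens : List String) : PySem.Set String :=
  PySem.Set.ofList (tokens.flatMap (fun t =>
    (PySem.List.pyRange 0 (PySem.Str.len t + 1) 1).map (fun k => PySem.Str.slice t none (some k))))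

def count_term_hits_py_alt (normalized_question : String) (tokens : List String) (terms : List String) : Int :=
  let prefixes := pvPrefixes tokens
  terms.foldl (fun hits term =>
    if PySem.Str.isIn " " term then
      if PySem.Str.isIn term normalized_question then hits + 1 else hits
    else
      if PySem.Set.contains prefixes term then hits + 1 else hits) 0

-- ===== PRECONDITION & SPEC =====
def Spec_count_term_hits_py (normalized_question : String) (tokens : List String) (terms : List String) (out : Int) : Prop := out = count_term_hits_py_alt normalized_question tokens terms
instance (normalized_question : String) (tokens : List String) (terms : List String) (out : Int) : Decidable (Spec_count_term_hits_py normalized_question tokens terms out) := by unfold Spec_count_term_hits_py; infer_instance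

-- ===== CLAIM (what is proved, stated in full; the proofs are below) =====
def Claim_equal_count_term_hits_py : Prop := ∀ (normalized_question : String) (tokens : List String) (terms : List String), Dom_count_term_hits_py normalized_question tokens terms → Spec_count_term_hits_py normalized_question tokens terms (count_term_hits_py normalized_question tokens terms)

-- ===== LEMMAS AND PROOFS =====

-- a single-word term matches some token by equality or prefix iff it lies in the prefix set
theorem pv_single_eq (tokens : List String) (term : String) :
    (PySem.Set.contains tokens term || tokens.any (fun token => PySem.Str.startswith token term))
      = PySem.Set.contains (pvPrefixes tokens) term := by
  rw [Bool.eq_iff_iff]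
  unfold pvPrefixes
  simp only [PySem.Set.contains_iff, PySem.Set.mem_ofList, List.mem_flatMap, List.mem_map,
    PySem.List.mem_pyRange_one, List.any_eq_true, Bool.or_eq_true, PySem.Str.startswith_eq,
    PySem.Chars.startswith_iff]
  constructor
  · rintro (h | ⟨tok, htok, hpre⟩)
    · refine ⟨term, h, (term.toList.length : Int), ⟨Int.natCast_nonneg _, ?_⟩, ?_⟩
      · have hl : PySem.Str.len term = (term.toList.length : Int) := by simp
        omega
      · rw [← String.toList_inj]
        calc (PySem.Str.slice term none (some ((term.toList.length : Int)))).toList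
            = PySem.Chars.slice term.toList none (some (term.toList.length : Int)) := by
              simp [PySem.Str.toList_slice]
          _ = term.toList.take ((term.toList.length : Int)).toNat :=
              PySem.List.slice_to _ (Int.natCast_nonneg _)
          _ = term.toList := by simp
    · refine ⟨tok, htok, (term.toList.length : Int), ⟨Int.natCast_nonneg _, ?_⟩, ?_⟩
      · have hl : PySem.Str.len tok = (tok.toList.length : Int) := by simp
        have hle := hpre.length_le
        omega
      · rw [← String.toList_inj]
        calc (PySem.Str.slice tok none (some ((term.toList.length : Int)))).toList
            = PySem.Chars.slice tok.toList none (some (term.toList.length : Int)) := by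
              simp [PySem.Str.toList_slice]
          _ = tok.toList.take ((term.toList.length : Int)).toNat :=
              PySem.List.slice_to _ (Int.natCast_nonneg _)
          _ = term.toList := by
              simp only [Int.toNat_natCast]
              exact (List.prefix_iff_eq_take.mp hpre).symm
  · rintro ⟨tok, htok, k, ⟨hk0, _⟩, heq⟩
    right
    refine ⟨tok, htok, ?_⟩
    rw [← heq]
    calc (PySem.Str.slice tok none (some k)).toList
        = PySem.Chars.slice tok.toList none (some k) := by simp [PySem.Str.toList_slice]
      _ = tok.toList.take k.toNat := PySem.List.slice_to _ hk0
      _ <+: tok.toList := List.take_prefix _ _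

-- ===== VERDICT (by name: the statement is the Claim_ definition above) =====
theorem count_term_hits_py_spec : Claim_equal_count_term_hits_py := by
  intro nq tokens terms _
  unfold Spec_count_term_hits_py count_term_hits_py count_term_hits_py_alt
  simp only [pv_single_eq]
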